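-- pv_equiv track=rewrite | github.com/esredson/designacoes | src/util.py | calcular_qtd_erros_distribuicao_antigo_com_peso
-- ===== SOURCE A (Python) =====
-- def find_last(str, array, end_index):
--     for i in range(end_index, -1, -1):
--         if array[i] == str:
--             return i
--     return -1
--
-- def calcular_qtd_erros_distribuicao_antigo_com_peso(array, valores_referencia):
--     qtd_vals_referencia = len(valores_referencia)
--     erro = 0
--     for i, val in enumerate(array):
--         posicao_anterior = find_last(val, array, end_index=i-1)
--         if (posicao_anterior > -1 and (i - posicao_anterior) < qtd_vals_referencia):
--             erro+=qtd_vals_referencia-(i-posicao_anterior)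
--     return erro
-- ===== SOURCE B (Python) =====
-- def calcular_qtd_erros_distribuicao_antigo_com_peso(array, valores_referencia):
--     k = len(valores_referencia)
--     positions = {}
--     for i, val in enumerate(array):
--         positions.setdefault(val, []).append(i)
--     erro = 0
--     for idxs in positions.values():
--         for prev, cur in zip(idxs, idxs[1:]):
--             if cur - prev < k:
--                 erro += k - (cur - prev)
--     return erro
-- ===== Notes on version B (the rewrite author's own statement) =====
-- stated objective: faster
-- what changed: Replaced the per-element backward scan with a two-stage group-by algorithm: one pass buckets each value's occurrence indices into a dict of lists, then a second pass sums the weighted penalty over adjacent index pairs within each bucket.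
import Mathlib
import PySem

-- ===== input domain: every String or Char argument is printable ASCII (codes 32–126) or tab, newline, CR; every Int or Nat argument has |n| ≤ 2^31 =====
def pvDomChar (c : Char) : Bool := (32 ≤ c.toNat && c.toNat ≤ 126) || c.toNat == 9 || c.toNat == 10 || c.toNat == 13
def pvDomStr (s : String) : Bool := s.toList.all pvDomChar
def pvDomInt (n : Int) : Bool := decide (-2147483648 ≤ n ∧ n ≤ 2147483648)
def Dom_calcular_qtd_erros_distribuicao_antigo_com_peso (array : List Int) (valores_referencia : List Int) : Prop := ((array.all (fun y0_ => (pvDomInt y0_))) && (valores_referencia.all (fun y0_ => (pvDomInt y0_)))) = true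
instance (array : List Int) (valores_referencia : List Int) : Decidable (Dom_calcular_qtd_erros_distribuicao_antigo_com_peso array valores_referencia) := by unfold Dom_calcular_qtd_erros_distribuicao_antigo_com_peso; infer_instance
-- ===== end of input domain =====

-- B replaces A's per-element backward scan by a two-stage group-by: bucket each value's
-- occurrence indices, then sum the penalty over adjacent pairs per bucket (measured faster).

-- ===== PORT A =====
-- find_last: the backward scan; array[i] ported with pyGet? (in every call from A below the index is in range).
def find_last (s : Int) (array : List Int) (end_index : Int) : Int :=
  match (PySem.List.pyRange end_index (-1) (-1)).find?
      (fun i => PySem.List.pyGet? array i == some s) with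
  | some i => i
  | none => -1

def calcular_qtd_erros_distribuicao_antigo_com_peso (array : List Int) (valores_referencia : List Int) : Int :=
  let qtd_vals_referencia : Int := valores_referencia.length
  (PySem.List.enumerate array 0).foldl
    (fun erro p =>
      let posicao_anterior := find_last p.2 array (p.1 - 1)
      if posicao_anterior > -1 ∧ p.1 - posicao_anterior < qtd_vals_referencia then
        erro + (qtd_vals_referencia - (p.1 - posicao_anterior))
      else erro)
    0

-- ===== PORT B =====
-- positions.setdefault(val, []).append(i) is d[val] = d.get(val, []) + [i], i.e. Dict.modify.
def calcular_qtd_erros_distribuicao_antigo_com_peso_alt (array : List Int) (valores_referencia : List Int) : Int :=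
  let k : Int := valores_referencia.length
  let positions := (PySem.List.enumerate array 0).foldl
      (fun d p => d.modify p.2 [] (fun l => l ++ [p.1])) PySem.Dict.empty
  positions.values.foldl
    (fun erro idxs =>
      (idxs.zip (PySem.List.slice idxs (some 1) none)).foldl
        (fun e q => if q.2 - q.1 < k then e + (k - (q.2 - q.1)) else e) erro)
    0

-- ===== PRECONDITION & SPEC =====
def Spec_calcular_qtd_erros_distribuicao_antigo_com_peso (array : List Int) (valores_referencia : List Int) (out : Int) : Prop := out = calcular_qtd_erros_distribuicao_antigo_com_peso_alt array valores_referencia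
instance (array : List Int) (valores_referencia : List Int) (out : Int) : Decidable (Spec_calcular_qtd_erros_distribuicao_antigo_com_peso array valores_referencia out) := by unfold Spec_calcular_qtd_erros_distribuicao_antigo_com_peso; infer_instance

-- ===== CLAIM (what is proved, stated in full; the proofs are below) =====
def Claim_equal_calcular_qtd_erros_distribuicao_antigo_com_peso : Prop := ∀ (array : List Int) (valores_referencia : List Int), Dom_calcular_qtd_erros_distribuicao_antigo_com_peso array valores_referencia → Spec_calcular_qtd_erros_distribuicao_antigo_com_peso array valores_referencia (calcular_qtd_erros_distribuicao_antigo_com_peso array valores_referencia)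

-- ===== LEMMAS AND PROOFS =====

-- weighted penalty of one adjacent pair (j, i) of occurrence indices
def gap (k : Int) (q : Int × Int) : Int := if q.2 - q.1 < k then k - (q.2 - q.1) else 0

-- total penalty of one bucket
def sumGap (k : Int) (l : List Int) : Int := ((l.zip l.tail).map (gap k)).sum

-- total penalty of the whole dict
def S (k : Int) (d : PySem.Dict Int (List Int)) : Int := (d.values.map (sumGap k)).sum

-- find_last returns -1 or a nonnegative index
lemma find_last_cases (s : Int) (array : List Int) (e : Int) :
    find_last s array e = -1 ∨ 0 ≤ find_last s array e := by
  unfold find_last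
  cases h : (PySem.List.pyRange e (-1) (-1)).find?
      (fun i => PySem.List.pyGet? array i == some s) with
  | none => exact Or.inl rfl
  | some i =>
      refine Or.inr ?_
      have hm := List.mem_of_find?_eq_some h
      have h2 := (PySem.List.mem_pyRange_neg_one).1 hm
      show (0 : Int) ≤ i
      omega

lemma find_last_neg_one (v : Int) (array : List Int) : find_last v array (-1) = -1 := by
  unfold find_last
  rw [PySem.List.pyRange_neg_one_eq_nil (by omega)]
  rfl

-- one step of the backward scan, at the index just past the prefix
lemma find_last_succ (v x : Int) (pre suf : List Int) :
    find_last v (pre ++ x :: suf) (pre.length : Int)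
      = if x = v then (pre.length : Int)
        else find_last v (pre ++ x :: suf) ((pre.length : Int) - 1) := by
  have hget : PySem.List.pyGet? (pre ++ x :: suf) (pre.length : Int) = some x := by
    rw [PySem.List.pyGet?_natCast]
    simp
  have hb : (PySem.List.pyGet? (pre ++ x :: suf) (pre.length : Int) == some v) = (x == v) := by
    rw [hget]; rfl
  unfold find_last
  rw [PySem.List.pyRange_neg_one_cons (by omega : (-1 : Int) < (pre.length : Int))]
  rw [List.find?_cons]
  simp only [hb]
  by_cases hxv : x = v
  · simp [hxv]
  · rw [show (x == v) = false from by simp [hxv], if_neg hxv]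

-- B's inner loop over one bucket is erro + sumGap
lemma inner_eq (k e : Int) (idxs : List Int) :
    (idxs.zip (PySem.List.slice idxs (some 1) none)).foldl
        (fun e q => if q.2 - q.1 < k then e + (k - (q.2 - q.1)) else e) e
      = e + sumGap k idxs := by
  rw [PySem.List.slice_from_one, sumGap]
  have hstep : (fun (e : Int) (q : Int × Int) =>
      if q.2 - q.1 < k then e + (k - (q.2 - q.1)) else e)
      = fun e q => e + gap k q := by
    funext e q; unfold gap; split_ifs <;> ring
  rw [hstep, PySem.List.foldl_add]

-- appending the next occurrence index to a bucket
lemma sumGap_append (k n : Int) (l : List Int) :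
    sumGap k (l ++ [n])
      = sumGap k l + (match l.getLast? with | none => 0 | some j => gap k (j, n)) := by
  induction l with
  | nil => simp [sumGap]
  | cons x l ih =>
      cases l with
      | nil => simp [sumGap]
      | cons y l' =>
          have h1 : sumGap k ((x :: y :: l') ++ [n]) = gap k (x, y) + sumGap k ((y :: l') ++ [n]) := by
            simp [sumGap]
          have h2 : sumGap k (x :: y :: l') = gap k (x, y) + sumGap k (y :: l') := by
            simp [sumGap]
          rw [h1, ih, h2]
          have hl : (x :: y :: l').getLast? = (y :: l').getLast? := by
            simp [List.getLast?_cons_cons]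
          rw [hl]; ring

-- changing a map pointwise at one element of a Nodup list
lemma sum_map_update {α : Type} [DecidableEq α] (g g' : α → Int) :
    ∀ (l : List α) (x : α), l.Nodup → x ∈ l → (∀ y ∈ l, y ≠ x → g' y = g y) →
      (l.map g').sum = (l.map g).sum + (g' x - g x) := by
  intro l
  induction l with
  | nil => intro x _ hx; simp at hx
  | cons a l ih =>
      intro x hnd hx hagree
      rcases List.mem_cons.1 hx with h | h
      · subst h
        have : ∀ y ∈ l, g' y = g y := by
          intro y hy
          exact hagree y (List.mem_cons_of_mem _ hy) (fun he => (List.nodup_cons.1 hnd).1 (he ▸ hy))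
        have hmap : l.map g' = l.map g := List.map_congr_left this
        simp [hmap]; ring
      · have hax : a ≠ x := fun he => (List.nodup_cons.1 hnd).1 (he ▸ h)
        have := ih x (List.nodup_cons.1 hnd).2 h
          (fun y hy hne => hagree y (List.mem_cons_of_mem _ hy) hne)
        simp [hagree a (List.mem_cons_self) hax, this]; ring

-- effect of one bucketing step on the total penalty
lemma S_modify (k n x : Int) (d : PySem.Dict Int (List Int)) (hnd : d.keys.Nodup) :
    S k (d.modify x [] (fun l => l ++ [n]))
      = S k d + (match (d.getD x []).getLast? with | none => 0 | some j => gap k (j, n)) := by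
  set d' := d.modify x [] (fun l => l ++ [n]) with hd'
  have hkeys : d'.keys = (d.insert x (d.getD x [] ++ [n])).keys :=
    PySem.Dict.keys_modify d x ([] : List Int) _
  have hgd : ∀ v, d'.getD v [] = if v = x then d.getD x [] ++ [n] else d.getD v [] := by
    intro v; rw [hd', PySem.Dict.getD_modify]
  by_cases hc : d.contains x
  · have hxk : x ∈ d.keys := (PySem.Dict.contains_iff_mem_keys d x).1 hc
    have hk' : d'.keys = d.keys := by
      rw [hkeys, PySem.Dict.keys_insert_of_contains d _ hc]
    have hnd' : d'.keys.Nodup := hk' ▸ hnd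
    rw [S, S, PySem.Dict.values_eq_map_keys d' hnd' ([] : List Int),
        PySem.Dict.values_eq_map_keys d hnd ([] : List Int), hk',
        List.map_map, List.map_map]
    simp only [Function.comp_def]
    have := sum_map_update (fun v => sumGap k (d.getD v []))
      (fun v => sumGap k (d'.getD v [])) d.keys x hnd hxk
      (by intro y _ hy; simp [hgd y, hy])
    have hx' : d'.getD x [] = d.getD x [] ++ [n] := by rw [hgd x, if_pos rfl]
    rw [this]
    simp only [hx', sumGap_append]
    ring
  · have hc' : d.contains x = false := by simpa using hc
    have hxk : x ∉ d.keys := fun h => hc ((PySem.Dict.contains_iff_mem_keys d x).2 h)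
    have hk' : d'.keys = d.keys ++ [x] := by
      rw [hkeys, PySem.Dict.keys_insert_of_not_contains d _ hc']
    have hnd' : d'.keys.Nodup := by
      rw [hk']
      refine List.Nodup.append hnd (List.nodup_singleton x) ?_
      intro a ha hb
      rw [List.mem_singleton] at hb
      exact hxk (hb ▸ ha)
    have hgx : d.getD x [] = [] := PySem.Dict.getD_of_not_contains d ([] : List Int) hc'
    rw [S, S, PySem.Dict.values_eq_map_keys d' hnd' ([] : List Int),
        PySem.Dict.values_eq_map_keys d hnd ([] : List Int), hk',
        List.map_map, List.map_map]
    simp only [Function.comp_def]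
    have hmap : d.keys.map (fun v => sumGap k (d'.getD v []))
        = d.keys.map (fun v => sumGap k (d.getD v [])) := by
      refine List.map_congr_left ?_
      intro y hy
      have : y ≠ x := fun he => hxk (he ▸ hy)
      simp [hgd y, this]
    rw [List.map_append, hmap, List.sum_append, hgx]
    simp [hgd x, hgx, sumGap]

-- main loop correspondence: bucketing the remaining suffix vs A's scan over it
lemma loop_eq (k : Int) (array : List Int) :
    ∀ (suf pre : List Int), array = pre ++ suf →
      ∀ (d : PySem.Dict Int (List Int)), d.keys.Nodup →
      (∀ v, (d.getD v []).getLast? =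
        (if find_last v array ((pre.length : Int) - 1) = -1 then none
         else some (find_last v array ((pre.length : Int) - 1)))) →
      S k ((PySem.List.enumerate suf (pre.length : Int)).foldl
            (fun d p => d.modify p.2 [] (fun l => l ++ [p.1])) d)
        = (PySem.List.enumerate suf (pre.length : Int)).foldl
            (fun erro p =>
              let pa := find_last p.2 array (p.1 - 1)
              if pa > -1 ∧ p.1 - pa < k then erro + (k - (p.1 - pa)) else erro)
            (S k d) := by
  intro suf
  induction suf with
  | nil => intro pre _ d _ _; simp [PySem.List.enumerate_nil]
  | cons x suf ih =>
      intro pre harr d hnd hd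
      rw [PySem.List.enumerate_cons, List.foldl_cons, List.foldl_cons]
      set n : Int := (pre.length : Int) with hn
      -- the bucketing step changes S exactly by A's step
      have hstep : S k (d.modify x [] (fun l => l ++ [n]))
          = (let pa := find_last x array (n - 1)
             if pa > -1 ∧ n - pa < k then S k d + (k - (n - pa)) else S k d) := by
        rw [S_modify k n x d hnd, hd x]
        rcases find_last_cases x array (n - 1) with h1 | h1
        · simp [h1]
        · have hne : ¬ find_last x array (n - 1) = -1 := by omega
          rw [if_neg hne]
          simp only [gap]
          split_ifs with hA hB hB
          · ring
          · exact absurd ⟨by omega, hA⟩ hB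
          · exact absurd hB.2 hA
          · ring
      have harr' : array = (pre ++ [x]) ++ suf := by rw [harr]; simp
      have hnd' : (d.modify x [] (fun l => l ++ [n])).keys.Nodup := by
        rw [PySem.Dict.keys_modify]
        by_cases hc : d.contains x
        · rwa [PySem.Dict.keys_insert_of_contains d _ hc]
        · rw [PySem.Dict.keys_insert_of_not_contains d _ (by simpa using hc)]
          have hxk : x ∉ d.keys := fun h => hc ((PySem.Dict.contains_iff_mem_keys d x).2 h)
          refine List.Nodup.append hnd (List.nodup_singleton x) ?_
          intro a ha hb
          rw [List.mem_singleton] at hb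
          exact hxk (hb ▸ ha)
      have hd' : ∀ v, ((d.modify x [] (fun l => l ++ [n])).getD v []).getLast? =
          (if find_last v array (((pre ++ [x]).length : Int) - 1) = -1 then none
           else some (find_last v array (((pre ++ [x]).length : Int) - 1))) := by
        intro v
        have hlen : ((pre ++ [x]).length : Int) - 1 = n := by simp [hn]
        have hfl : find_last v array (((pre ++ [x]).length : Int) - 1)
            = if x = v then n else find_last v array (n - 1) := by
          rw [hlen, harr, hn]
          have h0 := find_last_succ v x pre suf
          simpa using h0
        rw [PySem.Dict.getD_modify]
        by_cases hv : v = x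
        · have hfl2 : find_last v array (((pre ++ [x]).length : Int) - 1) = n := by
            rw [hfl, if_pos hv.symm]
          have hnn : ¬ (n = -1) := by rw [hn]; omega
          rw [if_pos hv, hfl2, if_neg hnn]
          simp
        · have hfl2 : find_last v array (((pre ++ [x]).length : Int) - 1)
              = find_last v array (n - 1) := by
            rw [hfl, if_neg (fun hh => hv hh.symm)]
          rw [if_neg hv, hfl2, hd v]
      have hrec := ih (pre ++ [x]) harr' (d.modify x [] (fun l => l ++ [n])) hnd' (by
        intro v; simpa using hd' v)
      have hlen2 : ((pre ++ [x]).length : Int) = n + 1 := by simp [hn]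
      rw [hlen2] at hrec
      rw [hrec, hstep]

-- ===== VERDICT (by name: the statement is the Claim_ definition above) =====
theorem calcular_qtd_erros_distribuicao_antigo_com_peso_spec : Claim_equal_calcular_qtd_erros_distribuicao_antigo_com_peso := by
  intro array valores_referencia _
  unfold Spec_calcular_qtd_erros_distribuicao_antigo_com_peso
  unfold calcular_qtd_erros_distribuicao_antigo_com_peso calcular_qtd_erros_distribuicao_antigo_com_peso_alt
  set k : Int := (valores_referencia.length : Int)
  -- B's second stage computes S of the dict built by the first stage
  have hB : ∀ (d : PySem.Dict Int (List Int)),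
      d.values.foldl
        (fun erro idxs =>
          (idxs.zip (PySem.List.slice idxs (some 1) none)).foldl
            (fun e q => if q.2 - q.1 < k then e + (k - (q.2 - q.1)) else e) erro)
        0 = S k d := by
    intro d
    rw [S]
    have : ∀ (ls : List (List Int)) (e : Int),
        ls.foldl
          (fun erro idxs =>
            (idxs.zip (PySem.List.slice idxs (some 1) none)).foldl
              (fun e q => if q.2 - q.1 < k then e + (k - (q.2 - q.1)) else e) erro)
          e = e + (ls.map (sumGap k)).sum := by
      intro ls
      induction ls with
      | nil => intro e; simp
      | cons l ls ih => intro e; rw [List.foldl_cons, inner_eq, List.map_cons, List.sum_cons, ih]; ring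
    rw [this]; ring
  rw [hB]
  have h := loop_eq k array array [] (by simp) PySem.Dict.empty (by simp [PySem.Dict.empty])
    (by
      intro v
      have h0 : ((([] : List Int)).length : Int) - 1 = -1 := by simp
      rw [h0, find_last_neg_one, if_pos rfl]
      simp [PySem.Dict.getD_empty])
  have hS0 : S k PySem.Dict.empty = 0 := by simp [S, PySem.Dict.empty]
  rw [hS0] at h
  simp only [List.length_nil, Nat.cast_zero] at h
  exact h.symm
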